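-- pv_equiv track=rewrite | github.com/ShiIiA/recommender-system-project | src/models/llm_enhancer.py | _get_health_benefit
-- ===== SOURCE A (Python) =====
-- from typing import Dict, List, Any
--
-- def _get_health_benefit(tags: List[str]) -> str:
--     """Get health benefit from tags"""
--     if any('healthy' in tag.lower() for tag in tags):
--         return "nutritious"
--     elif any('low-fat' in tag.lower() for tag in tags):
--         return "light"
--     elif any('vegetarian' in tag.lower() for tag in tags):
--         return "plant-based"
--     return "wholesome"
-- ===== SOURCE B (Python) =====
-- from typing import List
--
-- def _get_health_benefit(tags: List[str]) -> str:
--     """Get health benefit from tags (single pass, collect flags then classify)."""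
--     has_h = has_l = has_v = False
--     for tag in tags:
--         t = tag.lower()
--         if 'healthy' in t:
--             has_h = True
--         if 'low-fat' in t:
--             has_l = True
--         if 'vegetarian' in t:
--             has_v = True
--     if has_h:
--         return "nutritious"
--     if has_l:
--         return "light"
--     if has_v:
--         return "plant-based"
--     return "wholesome"
-- ===== Notes on version B (the rewrite author's own statement) =====
-- stated objective: faster
-- what changed: Replaces three sequential any(...) scans over the tag list with a single pass that lowercases each tag once and accumulates three boolean flags, deciding the label afterwards with the same priority.
import Mathlib
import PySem

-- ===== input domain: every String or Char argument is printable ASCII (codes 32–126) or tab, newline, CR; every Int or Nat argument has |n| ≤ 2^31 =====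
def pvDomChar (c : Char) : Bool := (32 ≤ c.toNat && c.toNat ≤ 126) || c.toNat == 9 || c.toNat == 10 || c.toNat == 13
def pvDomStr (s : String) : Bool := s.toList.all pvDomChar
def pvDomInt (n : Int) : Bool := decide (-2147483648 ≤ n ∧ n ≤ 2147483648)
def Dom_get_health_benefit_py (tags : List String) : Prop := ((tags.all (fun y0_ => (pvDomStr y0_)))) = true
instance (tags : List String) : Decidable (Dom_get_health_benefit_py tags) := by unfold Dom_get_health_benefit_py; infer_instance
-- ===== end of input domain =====

-- B makes one pass collecting three flags instead of A's three sequential any(...) scans; same priority order (objective: alternative decomposition).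

-- ===== PORT A =====
def get_health_benefit_py (tags : List String) : String :=
  if tags.any (fun tag => PySem.Str.isIn "healthy" (PySem.Str.lower tag)) then "nutritious"
  else if tags.any (fun tag => PySem.Str.isIn "low-fat" (PySem.Str.lower tag)) then "light"
  else if tags.any (fun tag => PySem.Str.isIn "vegetarian" (PySem.Str.lower tag)) then "plant-based"
  else "wholesome"

-- ===== PORT B =====
def get_health_benefit_py_alt (tags : List String) : String :=
  let flags := tags.foldl (fun (acc : Bool × Bool × Bool) tag =>
      let t := PySem.Str.lower tag
      (acc.1 || PySem.Str.isIn "healthy" t,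
       acc.2.1 || PySem.Str.isIn "low-fat" t,
       acc.2.2 || PySem.Str.isIn "vegetarian" t)) (false, false, false)
  if flags.1 then "nutritious"
  else if flags.2.1 then "light"
  else if flags.2.2 then "plant-based"
  else "wholesome"

-- ===== PRECONDITION & SPEC =====
def Spec_get_health_benefit_py (tags : List String) (out : String) : Prop := out = get_health_benefit_py_alt tags
instance (tags : List String) (out : String) : Decidable (Spec_get_health_benefit_py tags out) := by unfold Spec_get_health_benefit_py; infer_instance

-- ===== CLAIM (what is proved, stated in full; the proofs are below) =====
def Claim_equal_get_health_benefit_py : Prop := ∀ (tags : List String), Dom_get_health_benefit_py tags → Spec_get_health_benefit_py tags (get_health_benefit_py tags)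

-- ===== LEMMAS AND PROOFS =====

-- The flag-collecting fold computes exactly the three 'any' scans.
theorem pv_fold_flags (tags : List String) (a b c : Bool) :
    tags.foldl (fun (acc : Bool × Bool × Bool) tag =>
      let t := PySem.Str.lower tag
      (acc.1 || PySem.Str.isIn "healthy" t,
       acc.2.1 || PySem.Str.isIn "low-fat" t,
       acc.2.2 || PySem.Str.isIn "vegetarian" t)) (a, b, c)
    = (a || tags.any (fun tag => PySem.Str.isIn "healthy" (PySem.Str.lower tag)),
       b || tags.any (fun tag => PySem.Str.isIn "low-fat" (PySem.Str.lower tag)),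
       c || tags.any (fun tag => PySem.Str.isIn "vegetarian" (PySem.Str.lower tag))) := by
  induction tags generalizing a b c with
  | nil => simp
  | cons x xs ih =>
    rw [List.foldl_cons, ih]
    simp [Bool.or_assoc]

-- ===== VERDICT (by name: the statement is the Claim_ definition above) =====
theorem get_health_benefit_py_spec : Claim_equal_get_health_benefit_py := by
  intro tags _
  unfold Spec_get_health_benefit_py get_health_benefit_py get_health_benefit_py_alt
  simp only [pv_fold_flags, Bool.false_or]
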